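-- pv_equiv track=rewrite | github.com/SaiSudhaV/coding_platforms | distinct_pair_difference.py | distinct_pair_difference
-- ===== SOURCE A (Python) =====
-- def distinct_pair_difference(ar, n):
--     tem, res = [0 for i in range(n)], []
--     tem[0] = ar[0]
--     for i in range(1, n):
--         tem[i] = tem[i - 1] + ar[i]
--     for i in range(n):
--         res.append((i + 1) * ar[i] - tem[i])
--     return sum(res)
-- ===== SOURCE B (Python) =====
-- def distinct_pair_difference(ar, n):
--     total = 0
--     for i in range(n):
--         total += ar[i] * (2 * i + 1 - n)
--     return total
-- ===== Notes on version B (the rewrite author's own statement) =====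
-- stated objective: simpler
-- what changed: Replaces the prefix-sum array and the result list by a single accumulating pass using the closed-form coefficient ar[i]*(2*i+1-n).
-- outside the precondition, e.g. on distinct_pair_difference([], 0): A raises IndexError, B returns 0; on distinct_pair_difference([1, 2], 3): A raises IndexError, B raises IndexError
-- crash fix: For n <= 0 A raises IndexError (tem[0] = ar[0] on an empty tem) while B's empty loop returns 0; for n > len(ar) both raise IndexError. — e.g. on distinct_pair_difference([], 0): A raises IndexError, B returns 0
import Mathlib
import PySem

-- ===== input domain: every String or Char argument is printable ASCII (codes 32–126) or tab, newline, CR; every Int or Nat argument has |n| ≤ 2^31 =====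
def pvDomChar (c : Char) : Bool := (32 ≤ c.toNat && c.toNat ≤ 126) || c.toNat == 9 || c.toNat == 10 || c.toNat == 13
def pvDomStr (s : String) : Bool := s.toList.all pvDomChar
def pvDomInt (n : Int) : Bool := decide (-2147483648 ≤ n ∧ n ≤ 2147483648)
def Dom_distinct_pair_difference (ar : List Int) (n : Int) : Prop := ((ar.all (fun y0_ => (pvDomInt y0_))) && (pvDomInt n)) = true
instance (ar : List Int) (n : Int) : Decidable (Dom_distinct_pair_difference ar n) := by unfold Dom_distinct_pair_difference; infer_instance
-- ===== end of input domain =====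

-- B replaces A's prefix-sum array and result list by a single accumulating pass
-- with the closed-form coefficient ar[i]*(2*i+1-n) (simpler; return-value equivalence on Pre_).

-- ===== PORT A =====
def distinct_pair_difference (ar : List Int) (n : Int) : Int :=
  -- tem, res = [0 for i in range(n)], []; tem[0] = ar[0]
  let tem0 : List Int := (PySem.List.pyRange 0 n 1).map (fun _ => 0)
  let tem1 : List Int := PySem.List.pySetD tem0 0 (PySem.List.pyGetD ar 0 0)
  -- for i in range(1, n): tem[i] = tem[i-1] + ar[i]
  let tem : List Int := (PySem.List.pyRange 1 n 1).foldl
    (fun t i => PySem.List.pySetD t i (PySem.List.pyGetD t (i - 1) 0 + PySem.List.pyGetD ar i 0)) tem1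
  -- for i in range(n): res.append((i+1)*ar[i] - tem[i])
  let res : List Int := (PySem.List.pyRange 0 n 1).foldl
    (fun r i => r ++ [(i + 1) * PySem.List.pyGetD ar i 0 - PySem.List.pyGetD tem i 0]) []
  res.sum

-- ===== PORT B =====
def distinct_pair_difference_alt (ar : List Int) (n : Int) : Int :=
  (PySem.List.pyRange 0 n 1).foldl
    (fun total i => total + PySem.List.pyGetD ar i 0 * (2 * i + 1 - n)) 0

-- ===== PRECONDITION & SPEC =====
-- A raises IndexError unless 1 ≤ n ≤ len(ar): for n ≤ 0, tem is empty and 'tem[0] = ar[0]'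
-- raises; for n > len(ar), 'ar[i]' raises.  Pre_ is exactly the set of inputs A returns on.
def Pre_distinct_pair_difference (ar : List Int) (n : Int) : Prop :=
  1 ≤ n ∧ n ≤ (ar.length : Int)
instance (ar : List Int) (n : Int) : Decidable (Pre_distinct_pair_difference ar n) := by
  unfold Pre_distinct_pair_difference; infer_instance

def pvWitness_distinct_pair_difference : List Int × Int := ([3, 1, 4, 1, 5], 5)

-- For n ≤ 0 A raises IndexError (the assignment tem[0] = ar[0] on the empty tem) while B's empty loop returns 0.
def Raises_distinct_pair_difference (ar : List Int) (n : Int) : Prop := n ≤ 0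
instance (ar : List Int) (n : Int) : Decidable (Raises_distinct_pair_difference ar n) := by
  unfold Raises_distinct_pair_difference; infer_instance
def pvRaiseWitness_distinct_pair_difference : List Int × Int := ([], 0)
def pvRaiseWitnessOut_distinct_pair_difference : Int := 0

def Spec_distinct_pair_difference (ar : List Int) (n : Int) (out : Int) : Prop := out = distinct_pair_difference_alt ar n
instance (ar : List Int) (n : Int) (out : Int) : Decidable (Spec_distinct_pair_difference ar n out) := by unfold Spec_distinct_pair_difference; infer_instance

-- ===== CLAIM (what is proved, stated in full; the proofs are below) =====
def Claim_equal_distinct_pair_difference : Prop := ∀ (ar : List Int) (n : Int), Dom_distinct_pair_difference ar n → Pre_distinct_pair_difference ar n → Spec_distinct_pair_difference ar n (distinct_pair_difference ar n)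

def Claim_raises_distinct_pair_difference : Prop := (∀ (ar : List Int) (n : Int), Dom_distinct_pair_difference ar n → Raises_distinct_pair_difference ar n → ¬ Pre_distinct_pair_difference ar n) ∧ (Dom_distinct_pair_difference (pvRaiseWitness_distinct_pair_difference.1) (pvRaiseWitness_distinct_pair_difference.2) ∧ Raises_distinct_pair_difference (pvRaiseWitness_distinct_pair_difference.1) (pvRaiseWitness_distinct_pair_difference.2) ∧ distinct_pair_difference_alt (pvRaiseWitness_distinct_pair_difference.1) (pvRaiseWitness_distinct_pair_difference.2) = pvRaiseWitnessOut_distinct_pair_difference)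

-- ===== LEMMAS AND PROOFS =====

-- prefix sum of the first k+1 elements (what A's tem[k] holds)
def pvPre (ar : List Int) (k : Nat) : Int := (ar.take (k + 1)).sum

lemma pvSum_take (ar : List Int) (t : Nat) :
    (ar.take t).sum = ((List.range t).map (fun j => ar.getD j 0)).sum := by
  induction t with
  | zero => simp
  | succ t ih =>
    rw [List.take_add_one, List.range_succ, List.map_append, List.sum_append, List.sum_append, ih]
    cases h : ar[t]? <;> simp [h, List.getD]

lemma pvPre_succ (ar : List Int) (a : Nat) (ha : a < ar.length) :
    pvPre ar a = (if a = 0 then 0 else pvPre ar (a - 1)) + ar.getD a 0 := by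
  cases a with
  | zero =>
    cases ar with
    | nil => simp at ha
    | cons x t => simp [pvPre, List.getD]
  | succ a =>
    simp only [pvPre, Nat.succ_sub_one, if_neg (Nat.succ_ne_zero a)]
    rw [List.take_add_one, List.sum_append, List.getD, List.getElem?_eq_getElem ha]
    simp

lemma pvSum_map_sub (l : List Nat) (g h : Nat → Int) :
    (l.map (fun k => g k - h k)).sum = (l.map g).sum - (l.map h).sum := by
  induction l with
  | nil => simp
  | cons x t ih => simp [ih]; ring

-- invariant of A's tem-building loop
lemma pvTem_inv (ar : List Int) (m : Nat) (hm : m ≤ ar.length) :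
    ∀ (c a : Nat) (t : List Int), t.length = m → a + c = m → 1 ≤ a →
    (∀ k : Nat, k < a → t.getD k 0 = pvPre ar k) →
    ∀ k : Nat, k < m →
      ((PySem.List.pyRange (a : Int) (m : Int) 1).foldl
        (fun t i => PySem.List.pySetD t i (PySem.List.pyGetD t (i - 1) 0 + PySem.List.pyGetD ar i 0)) t).getD k 0
      = pvPre ar k := by
  intro c
  induction c with
  | zero =>
    intro a t hlen hac ha hinv k hk
    rw [PySem.List.pyRange_one_eq_nil (by omega)]
    exact hinv k (by omega)
  | succ c ih =>
    intro a t hlen hac ha hinv k hk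
    rw [PySem.List.pyRange_one_cons (by exact_mod_cast (by omega : (a : Int) < (m : Int)))]
    rw [List.foldl_cons]
    have hstep : (PySem.List.pySetD t (a : Int)
          (PySem.List.pyGetD t ((a : Int) - 1) 0 + PySem.List.pyGetD ar (a : Int) 0))
        = t.set a (t.getD (a - 1) 0 + ar.getD a 0) := by
      have h1 : ((a : Int) - 1) = ((a - 1 : Nat) : Int) := by omega
      rw [h1]
      simp [PySem.List.pySetD_natCast, PySem.List.pyGetD_natCast]
    rw [hstep]
    have h1 : ((a : Int) + 1) = ((a + 1 : Nat) : Int) := by push_cast; ring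
    rw [h1]
    refine ih (a + 1) _ (by simp [hlen]) (by omega) (by omega) ?_ k hk
    intro j hj
    rcases Nat.lt_succ_iff_lt_or_eq.mp hj with hj | hj
    · rw [List.getD, List.getElem?_set_ne (by omega), ← List.getD]
      exact hinv j hj
    · rw [hj, List.getD, List.getElem?_set_self (by omega), Option.getD_some]
      rw [hinv (a - 1) (by omega), pvPre_succ ar a (by omega), if_neg (by omega)]

-- the arithmetic identity behind B's closed form
lemma pvMain_sum (f : Nat → Int) : ∀ m : Nat,
    ((List.range m).map (fun (k : Nat) => ((k : Int) + 1) * f k - ((List.range (k + 1)).map f).sum)).sum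
    = ((List.range m).map (fun (k : Nat) => f k * (2 * (k : Int) + 1 - (m : Int)))).sum := by
  intro m
  induction m with
  | zero => simp
  | succ m ih =>
    have hLs : ((List.range (m + 1)).map (fun (k : Nat) => ((k : Int) + 1) * f k - ((List.range (k + 1)).map f).sum)).sum
        = ((List.range m).map (fun (k : Nat) => ((k : Int) + 1) * f k - ((List.range (k + 1)).map f).sum)).sum
          + (((m : Int) + 1) * f m - ((List.range (m + 1)).map f).sum) := by
      rw [List.range_succ, List.map_append, List.sum_append]
      simp [List.range_succ]
    have hsplit : ((List.range (m + 1)).map (fun (k : Nat) => f k * (2 * (k : Int) + 1 - ((m : Int) + 1)))).sum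
        = ((List.range (m + 1)).map (fun (k : Nat) => f k * (2 * (k : Int) + 1 - (m : Int)))).sum
          - ((List.range (m + 1)).map f).sum := by
      rw [← pvSum_map_sub]
      refine congrArg List.sum (List.map_congr_left ?_)
      intro k _; ring
    have hsplit2 : ((List.range (m + 1)).map (fun (k : Nat) => f k * (2 * (k : Int) + 1 - (m : Int)))).sum
        = ((List.range m).map (fun (k : Nat) => f k * (2 * (k : Int) + 1 - (m : Int)))).sum
          + f m * (2 * (m : Int) + 1 - (m : Int)) := by
      rw [List.range_succ, List.map_append, List.sum_append]; simp
    push_cast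
    rw [hLs, hsplit, hsplit2, ih]
    ring

lemma pvB_eval (ar : List Int) (n : Int) (m : Nat) (hn : n = (m : Int)) :
    distinct_pair_difference_alt ar n
    = ((List.range m).map (fun (k : Nat) => ar.getD k 0 * (2 * (k : Int) + 1 - (m : Int)))).sum := by
  subst hn
  unfold distinct_pair_difference_alt
  rw [PySem.List.foldl_add]
  rw [PySem.List.pyRange_zero_nat]
  simp [List.map_map, Function.comp_def, PySem.List.pyGetD_natCast, List.getD]

lemma pvA_eval (ar : List Int) (m : Nat) (hm1 : 1 ≤ m) (hmlen : m ≤ ar.length) :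
    distinct_pair_difference ar (m : Int)
    = ((List.range m).map (fun (k : Nat) => ((k : Int) + 1) * ar.getD k 0 - pvPre ar k)).sum := by
  have hlen0 : ((PySem.List.pyRange 0 (m : Int) 1).map (fun _ => (0 : Int))).length = m := by
    simp [PySem.List.length_pyRange_one]
  have hinit : ∀ k : Nat, k < 1 →
      (PySem.List.pySetD ((PySem.List.pyRange 0 (m : Int) 1).map (fun _ => (0 : Int))) 0
        (PySem.List.pyGetD ar 0 0)).getD k 0 = pvPre ar k := by
    intro k hk
    interval_cases k
    rw [show (0 : Int) = ((0 : Nat) : Int) from rfl, PySem.List.pySetD_natCast]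
    simp only [Nat.cast_zero]
    rw [List.getD, List.getElem?_set_self (by simp; omega), Option.getD_some]
    rw [PySem.List.pyGetD_zero]
    have h0 := pvPre_succ ar 0 (by omega)
    simp at h0
    exact h0.symm
  have htem := pvTem_inv ar m hmlen (m - 1) 1 _
    (by simpa [PySem.List.length_pySetD] using hlen0) (by omega) (by omega) hinit
  rw [Nat.cast_one] at htem
  rw [PySem.List.pyRange_zero_nat] at htem
  unfold distinct_pair_difference
  simp only [PySem.List.foldl_append_singleton_eq_map, List.nil_append]
  rw [PySem.List.pyRange_zero_nat, List.map_map]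
  refine congrArg List.sum (List.map_congr_left ?_)
  intro k hk
  simp only [Function.comp_def, PySem.List.pyGetD_natCast]
  rw [htem k (List.mem_range.mp hk)]

-- ===== VERDICT (by name: the statement is the Claim_ definition above) =====
theorem distinct_pair_difference_spec : Claim_equal_distinct_pair_difference := by
  intro ar n _ hpre
  obtain ⟨h1, h2⟩ := hpre
  obtain ⟨m, rfl⟩ : ∃ m : Nat, n = (m : Int) := ⟨n.toNat, by omega⟩
  have hm1 : 1 ≤ m := by exact_mod_cast h1
  have hmlen : m ≤ ar.length := by exact_mod_cast h2
  unfold Spec_distinct_pair_difference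
  rw [pvA_eval ar m hm1 hmlen, pvB_eval ar _ m rfl]
  have hrw : ((List.range m).map (fun (k : Nat) => ((k : Int) + 1) * ar.getD k 0 - pvPre ar k))
      = ((List.range m).map (fun (k : Nat) => ((k : Int) + 1) * ar.getD k 0
          - ((List.range (k + 1)).map (fun j => ar.getD j 0)).sum)) :=
    List.map_congr_left (fun k _ => by rw [pvPre, pvSum_take])
  rw [hrw, pvMain_sum (fun j => ar.getD j 0) m]

@[simp]
theorem distinct_pair_difference_raises : Claim_raises_distinct_pair_difference := by
  unfold Claim_raises_distinct_pair_difference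
  constructor
  · intro ar n _ hr hp
    exact absurd hp.1 (by unfold Raises_distinct_pair_difference at hr; omega)
  · exact ⟨by decide, by decide, by decide⟩
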